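-- pv_equiv track=rewrite | github.com/vjkmr0898/programs | programs/bankmodule1.py | user_ph_number
-- ===== SOURCE A (Python) =====
-- def user_ph_number(number):
--     mob_num=''
--     count=0
--     for i in range(0,len(number),2):
--         if count<4:
--             mob_num=mob_num+number[i]
--             count=count+1
--     return mob_num
-- ===== SOURCE B (Python) =====
-- def user_ph_number(number):
--     return number[0:8:2]
-- ===== Notes on version B (the rewrite author's own statement) =====
-- stated objective: simpler
-- what changed: Replaces the loop over range(0,len,2) with a counter capped at 4 by a single extended slice number[0:8:2].
import Mathlib
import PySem

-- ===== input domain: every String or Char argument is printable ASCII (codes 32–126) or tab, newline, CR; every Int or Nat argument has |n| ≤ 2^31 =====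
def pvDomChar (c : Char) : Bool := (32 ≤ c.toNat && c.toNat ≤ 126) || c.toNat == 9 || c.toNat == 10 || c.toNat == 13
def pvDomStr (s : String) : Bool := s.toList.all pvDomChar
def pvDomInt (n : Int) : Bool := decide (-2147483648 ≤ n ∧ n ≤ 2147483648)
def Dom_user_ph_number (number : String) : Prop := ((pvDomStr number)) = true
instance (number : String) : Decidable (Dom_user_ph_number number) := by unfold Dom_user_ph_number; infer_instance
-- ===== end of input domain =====

-- B changes A's loop-and-counter into one extended slice number[0:8:2]; objective: simpler.

-- ===== PORT A =====
-- loop body: 'if count<4: mob_num=mob_num+number[i]; count=count+1'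
-- (number[i] via pyGet?; the none branch is unreachable since i ∈ range(0,len(number),2))
def pvStepA (l : List Char) (st : String × Int) (i : Int) : String × Int :=
  if st.2 < 4 then
    match PySem.List.pyGet? l i with
    | some c => (st.1.push c, st.2 + 1)
    | none => st
  else st

def user_ph_number (number : String) : String :=
  ((PySem.List.pyRange 0 (number.toList.length : Int) 2).foldl
    (pvStepA number.toList) ("", 0)).1

-- ===== PORT B =====
def user_ph_number_alt (number : String) : String :=
  (PySem.Str.slice? number (some 0) (some 8) 2).getD ""

-- ===== PRECONDITION & SPEC =====
def Spec_user_ph_number (number : String) (out : String) : Prop := out = user_ph_number_alt number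
instance (number : String) (out : String) : Decidable (Spec_user_ph_number number out) := by unfold Spec_user_ph_number; infer_instance

-- ===== CLAIM (what is proved, stated in full; the proofs are below) =====
def Claim_equal_user_ph_number : Prop := ∀ (number : String), Dom_user_ph_number number → Spec_user_ph_number number (user_ph_number number)

-- ===== LEMMAS AND PROOFS =====

-- the common normal form of both results: the characters at indices 0,2,…,2*(c-1)
def pvTake (l : List Char) (c : Nat) : List Char :=
  (List.range c).map (fun k => l.getD (2 * k) default)

theorem pvFoldA (l : List Char) (m : Nat) (h : ∀ k, k < m → 2 * k < l.length) :
    (List.map (fun k : Nat => (2 : Int) * (k : Int)) (List.range m)).foldl (pvStepA l) ("", 0)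
      = (String.ofList (pvTake l (min 4 m)), ((min 4 m : Nat) : Int)) := by
  induction m with
  | zero => simp [pvTake]
  | succ m ih =>
    have h' : ∀ k, k < m → 2 * k < l.length := fun k hk => h k (Nat.lt_succ_of_lt hk)
    have hm : 2 * m < l.length := h m (Nat.lt_succ_self m)
    rw [List.range_succ, List.map_append, List.foldl_append, ih h']
    simp only [List.map_cons, List.map_nil, List.foldl_cons, List.foldl_nil, pvStepA]
    have hcast : (2 * (m : Int)) = ((2 * m : Nat) : Int) := by push_cast; ring
    rw [hcast, PySem.List.pyGet?_natCast]
    rw [List.getElem?_eq_getElem hm]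
    by_cases hm4 : m < 4
    · have h2 : min 4 m = m := by omega
      have h3 : min 4 (m + 1) = m + 1 := by omega
      simp only [h2, h3]
      rw [if_pos (by exact_mod_cast hm4)]
      refine Prod.ext ?_ ?_
      · show (String.ofList (pvTake l m)).push l[2*m] = String.ofList (pvTake l (m+1))
        apply String.toList_injective
        simp [pvTake, List.range_succ, List.getElem?_eq_getElem hm]
      · show ((m : Int) + 1) = ((m + 1 : Nat) : Int)
        push_cast; ring
    · have h2 : min 4 (m + 1) = min 4 m := by omega
      rw [if_neg (by simp; omega), h2]

theorem pvFilterMapEq (l : List Char) (c : Nat) (h : ∀ k, k < c → 2 * k < l.length) :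
    (List.range c).filterMap (fun k => l[2 * k]?) = pvTake l c := by
  induction c with
  | zero => simp [pvTake]
  | succ c ih =>
    have h' : ∀ k, k < c → 2 * k < l.length := fun k hk => h k (Nat.lt_succ_of_lt hk)
    have hc : 2 * c < l.length := h c (Nat.lt_succ_self c)
    rw [List.range_succ, List.filterMap_append, ih h']
    simp [pvTake, List.range_succ, List.getElem?_eq_getElem hc]

theorem user_ph_number_spec : Claim_equal_user_ph_number := by
  intro number _
  unfold Spec_user_ph_number user_ph_number user_ph_number_alt
  set l := number.toList with hl
  set L := l.length with hL
  -- A side: pyRange 0 L 2 = map (2*·) (range M), M = (L+1)/2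
  have hM : ∀ k, k < (L + 1) / 2 → 2 * k < L := by omega
  have hcnt : (if (0:Int) < (L:Int) then (((L:Int) - 0 + 2 - 1) / 2).toNat else 0)
      = (L + 1) / 2 := by split_ifs <;> omega
  rw [PySem.List.pyRange_of_pos 0 (L : Int) (by norm_num), hcnt]
  simp only [zero_add]
  rw [pvFoldA l ((L + 1) / 2) hM]
  -- B side
  rw [PySem.Str.slice?]
  rw [PySem.Chars.slice?_eq_listSlice?, ← hl]
  rw [PySem.List.slice?]
  simp only [if_neg (by norm_num : ¬ (2:Int) = 0)]
  rw [PySem.List.sliceIndices]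
  simp only [if_neg (by norm_num : ¬ (2:Int) < 0), ← hL]
  have e0 : (if (0:Int) < 0 then max (0 + (L:Int)) 0 else min 0 (L:Int)) = 0 := by
    rw [if_neg (by norm_num)]
    omega
  have e8 : (if (8:Int) < 0 then max (8 + (L:Int)) 0 else min 8 (L:Int)) = min 8 (L:Int) := by
    rw [if_neg (by norm_num)]
  rw [e0, e8]
  have hcnt2 : (if (0:Int) < 2 then if (0:Int) < min 8 (L:Int) then ((min 8 (L:Int) - 0 + 2 - 1) / 2).toNat else 0
      else if min 8 (L:Int) < 0 then ((0 - min 8 (L:Int) + -2 - 1) / -2).toNat else 0)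
      = min 4 ((L + 1) / 2) := by
    by_cases h8 : (L : Int) ≤ 8
    · rw [min_eq_right h8]; split_ifs <;> omega
    · rw [min_eq_left (by omega : (8:Int) ≤ (L:Int))]; split_ifs <;> omega
  rw [hcnt2]
  have hidx : ∀ k ∈ List.range (min 4 ((L + 1) / 2)),
      l[((0:Int) + 2 * (k:Int)).toNat]? = l[2 * k]? := by
    intro k _
    have hk : ((0:Int) + 2 * (k:Int)).toNat = 2 * k := by omega
    rw [hk]
  rw [List.filterMap_congr hidx]
  have hmin : ∀ k, k < min 4 ((L + 1) / 2) → 2 * k < L := by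
    intro k hk
    have h2 : k < (L + 1) / 2 := lt_of_lt_of_le hk (min_le_right _ _)
    omega
  rw [pvFilterMapEq l (min 4 ((L + 1) / 2)) hmin]
  rfl

-- ===== VERDICT (by name: the statement is the Claim_ definition above) =====
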